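-- pv_equiv track=rewrite | github.com/chuangyan132/interview_helper | internviewer_helper.py | format_chatgpt_response
-- ===== SOURCE A (Python) =====
-- def format_chatgpt_response(response):
--     formatted_lines = []
--
--     formatted_lines.append('<div style="font-size: 16px; line-height: 0.7;">')
--
--     for line in response.split('\n'):
--         if line.strip():
--             # Handle bold text
--             while '**' in line:
--                 line = line.replace('**', '<strong>', 1)
--                 line = line.replace('**', '</strong>', 1)
--
--             # Handle section titles
--             if ':' in line and line.split(':')[0].isupper():
--                 parts = line.split(':', 1)
--                 line = f'<strong>{parts[0]}:</strong>{parts[1]}'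
--
--             formatted_lines.append(f"{line}<br>")
--
--     formatted_lines.append('</div>')
--     return '<br>'.join(formatted_lines)
-- ===== SOURCE B (Python) =====
-- def _format_line(line):
--     # single left-to-right pass over the line: each '**' becomes an
--     # alternating <strong>/</strong> tag (an unmatched final '**' opens)
--     out = []
--     opened = False
--     i = 0
--     n = len(line)
--     while i < n:
--         if line.startswith('**', i):
--             out.append('</strong>' if opened else '<strong>')
--             opened = not opened
--             i += 2
--         else:
--             out.append(line[i])
--             i += 1
--     line = ''.join(out)
--     head, sep, tail = line.partition(':')
--     if sep and head.isupper():
--         line = f'<strong>{head}:</strong>{tail}'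
--     return line
--
--
-- def format_chatgpt_response(response):
--     body = [_format_line(l) + '<br>'
--             for l in response.split('\n') if l.strip()]
--     return '<br>'.join(['<div style="font-size: 16px; line-height: 0.7;">']
--                        + body + ['</div>'])
-- ===== Notes on version B (the rewrite author's own statement) =====
-- stated objective: alternative
-- what changed: The repeated replace-first-occurrence passes of A's while loop (each pass rescanning the whole line for the bold marker) are replaced by one single left-to-right scan that emits alternating open/close tags with a parity flag; the two colon-splitting calls of the section-title branch become one str.partition, and the append loop becomes a comprehension over the filtered lines.
import Mathlib
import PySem

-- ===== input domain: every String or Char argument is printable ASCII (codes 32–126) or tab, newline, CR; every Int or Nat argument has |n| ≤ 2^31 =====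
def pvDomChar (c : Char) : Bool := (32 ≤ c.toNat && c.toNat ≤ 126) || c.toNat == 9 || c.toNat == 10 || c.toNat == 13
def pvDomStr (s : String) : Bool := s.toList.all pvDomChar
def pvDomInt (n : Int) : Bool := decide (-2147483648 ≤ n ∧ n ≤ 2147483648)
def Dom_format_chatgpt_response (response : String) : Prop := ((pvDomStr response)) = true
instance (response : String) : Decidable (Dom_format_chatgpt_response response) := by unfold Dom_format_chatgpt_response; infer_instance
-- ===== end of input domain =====

-- B replaces A's repeated replace('**',…,1) passes by one left-to-right scan with a
-- parity flag and the split(':') pair by one partition (objective: alternative).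

-- shared string constants
def pvOpen : List Char := "<strong>".toList
def pvClose : List Char := "</strong>".toList
def pvBr : List Char := "<br>".toList
def pvHeader : List Char := "<div style=\"font-size: 16px; line-height: 0.7;\">".toList
def pvFooter : List Char := "</div>".toList

-- str.isupper(), exact on the ASCII domain: at least one letter and no lowercase letter
def pvIsupperStr (cs : List Char) : Bool :=
  cs.any PySem.Chars.isalpha && cs.all (fun c => !PySem.Chars.islower c)

-- ===== PORT A =====
-- s.replace(old, new, 1): hand port (PySem.Chars.replace has no count); exact for
-- nonempty old — replaces the leftmost occurrence only.
def pvReplace1 : List Char → List Char → List Char → List Char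
  | [], _, _ => []
  | c :: cs, old, new =>
    if old.isPrefixOf (c :: cs) then new ++ (c :: cs).drop old.length
    else c :: pvReplace1 cs old new

-- A's `while '**' in line:` loop; the fuel argument only makes the loop total
-- (each iteration removes at least two '*', so length-many steps never run out).
def pvBoldA : Nat → List Char → List Char
  | 0, s => s
  | fuel+1, s =>
    if PySem.Chars.isIn ['*','*'] s then
      pvBoldA fuel (pvReplace1 (pvReplace1 s ['*','*'] pvOpen) ['*','*'] pvClose)
    else s

-- the body of A's for-loop applied to one line
-- (split(':') never returns an empty list, so Python's [0] is its head: getD 0)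
def pvLineA (l : List Char) : List Char :=
  let l1 := pvBoldA l.length l
  if PySem.Chars.isIn [':'] l1 && pvIsupperStr ((PySem.Chars.splitOn l1 [':']).getD 0 []) then
    let parts := PySem.Chars.splitOnMax l1 [':'] 1
    pvOpen ++ parts.getD 0 [] ++ [':'] ++ pvClose ++ parts.getD 1 []
  else l1

def format_chatgpt_response (response : String) : String :=
  let lines := PySem.Chars.splitOn response.toList ['\n']
  let fl := lines.foldl
    (fun acc l => if !(PySem.Chars.strip l).isEmpty then acc ++ [pvLineA l ++ pvBr] else acc)
    [pvHeader]
  String.mk (PySem.Chars.join pvBr (fl ++ [pvFooter]))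

-- ===== PORT B =====
-- B's single scan: each '**' becomes an alternating tag, other chars are copied
def pvScanB : List Char → Bool → List Char
  | [], _ => []
  | [c], _ => [c]
  | a :: b :: t, opened =>
    if a == '*' && b == '*' then (if opened then pvClose else pvOpen) ++ pvScanB t (!opened)
    else a :: pvScanB (b :: t) opened

-- B's _format_line; partition(':') ported by hand via find:
-- (s[:i], ':', s[i+1:]) when i = s.find(':') ≥ 0, else (s, '', '') — exact.
def pvLineB (l : List Char) : List Char :=
  let l1 := pvScanB l false
  let i := PySem.Chars.find l1 [':']
  if i == -1 then l1
  else
    let hd := l1.take i.toNat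
    if pvIsupperStr hd then pvOpen ++ hd ++ [':'] ++ pvClose ++ l1.drop (i.toNat + 1)
    else l1

def format_chatgpt_response_alt (response : String) : String :=
  let lines := PySem.Chars.splitOn response.toList ['\n']
  let body := (lines.filter (fun l => !(PySem.Chars.strip l).isEmpty)).map (fun l => pvLineB l ++ pvBr)
  String.mk (PySem.Chars.join pvBr (pvHeader :: body ++ [pvFooter]))

-- ===== PRECONDITION & SPEC =====
def Spec_format_chatgpt_response (response : String) (out : String) : Prop := out = format_chatgpt_response_alt response
instance (response : String) (out : String) : Decidable (Spec_format_chatgpt_response response out) := by unfold Spec_format_chatgpt_response; infer_instance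

-- ===== CLAIM (what is proved, stated in full; the proofs are below) =====
def Claim_equal_format_chatgpt_response : Prop := ∀ (response : String), Dom_format_chatgpt_response response → Spec_format_chatgpt_response response (format_chatgpt_response response)

-- ===== LEMMAS AND PROOFS =====

-- `s contains "**"`, in directly recursive form (proof-side mirror of isIn ['*','*'])
def pvHasDS : List Char → Bool
  | [] => false
  | c :: t => (['*','*'] : List Char).isPrefixOf (c :: t) || pvHasDS t

theorem pv_prefixSS (l : List Char) :
    (['*','*'] : List Char).isPrefixOf l = true ↔ ∃ t, l = '*' :: '*' :: t := by
  match l with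
  | [] => simp [List.isPrefixOf]
  | [a] => simp [List.isPrefixOf]
  | a :: b :: t =>
    simp only [List.isPrefixOf, Bool.and_true, Bool.and_eq_true, beq_iff_eq]
    constructor
    · rintro ⟨h1, h2⟩; exact ⟨t, by rw [← h1, ← h2]⟩
    · rintro ⟨t', h⟩
      injection h with h1 h2; injection h2 with h2 h3
      exact ⟨h1.symm, h2.symm⟩

theorem pv_hasDS_cons (c : Char) (t : List Char) :
    pvHasDS (c :: t) = ((['*','*'] : List Char).isPrefixOf (c :: t) || pvHasDS t) := rfl

theorem pv_hasDS_ss (t : List Char) : pvHasDS ('*' :: '*' :: t) = true := by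
  rw [pv_hasDS_cons]
  have : (['*','*'] : List Char).isPrefixOf ('*' :: '*' :: t) = true :=
    (pv_prefixSS _).mpr ⟨t, rfl⟩
  simp [this]

theorem pv_hasDS_short (l : List Char) (h : l.length ≤ 1) : pvHasDS l = false := by
  match l with
  | [] => rfl
  | [c] =>
    rw [pv_hasDS_cons]
    have : (['*','*'] : List Char).isPrefixOf [c] = false := by
      cases hP : (['*','*'] : List Char).isPrefixOf [c]
      · rfl
      · exfalso
        obtain ⟨t, ht⟩ := (pv_prefixSS [c]).mp hP
        simp at ht
    simp [this, pvHasDS]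
  | a :: b :: t => simp at h

theorem pv_hasDS_append_left (x y : List Char) (h : pvHasDS x = true) :
    pvHasDS (x ++ y) = true := by
  induction x with
  | nil => simp [pvHasDS] at h
  | cons c t ih =>
    rw [pv_hasDS_cons] at h
    rcases Bool.or_eq_true_iff.mp h with h1 | h2
    · obtain ⟨t', ht⟩ := (pv_prefixSS _).mp h1
      injection ht with e1 e2; subst e1
      subst e2
      simpa using pv_hasDS_ss (t' ++ y)
    · rw [List.cons_append, pv_hasDS_cons, ih h2]
      simp

theorem pv_hasDS_ends_star (x z : List Char) (h : x.getLast? = some '*') :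
    pvHasDS (x ++ '*' :: z) = true := by
  induction x with
  | nil => simp at h
  | cons c t ih =>
    match t with
    | [] =>
      simp at h; subst h
      simpa using pv_hasDS_ss z
    | d :: t' =>
      rw [List.getLast?_cons_cons] at h
      have := ih h
      rw [List.cons_append, pv_hasDS_cons, this]
      simp

theorem pv_hasDS_append_false (x y : List Char) (hx : pvHasDS x = false)
    (hy : pvHasDS y = false) (hb : x.getLast? ≠ some '*' ∨ y.head? ≠ some '*') :
    pvHasDS (x ++ y) = false := by
  induction x with
  | nil => simpa using hy
  | cons c t ih =>
    rw [pv_hasDS_cons] at hx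
    have hpre : (['*','*'] : List Char).isPrefixOf (c :: t) = false := by
      cases hp : (['*','*'] : List Char).isPrefixOf (c :: t) <;> simp_all
    have ht : pvHasDS t = false := by
      cases hp : pvHasDS t <;> simp_all
    rw [List.cons_append, pv_hasDS_cons]
    have hrec : pvHasDS (t ++ y) = false := by
      match t with
      | [] =>
        have : (c :: ([] : List Char)).getLast? = some c := rfl
        rcases hb with hb | hb
        · -- x = [c], c ≠ '*'  — but we do not even need that here
          simpa using hy
        · simpa using hy
      | d :: t' =>
        apply ih ht
        rcases hb with hb | hb
        · left; rw [List.getLast?_cons_cons] at hb; exact hb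
        · right; exact hb
    rw [hrec]
    have hpre2 : (['*','*'] : List Char).isPrefixOf (c :: (t ++ y)) = false := by
      cases hP : (['*','*'] : List Char).isPrefixOf (c :: (t ++ y))
      · rfl
      · exfalso
        obtain ⟨t2, ht2⟩ := (pv_prefixSS _).mp hP
        injection ht2 with e1 e2; subst e1
        match t, e2 with
        | [], e2 =>
          rcases hb with hb | hb
          · exact hb rfl
          · rw [show ([] : List Char) ++ y = y from rfl] at e2
            subst e2; exact hb rfl
        | d :: t', e2 =>
          have : d = '*' := by
            have := congrArg List.head? e2; simpa using this
          subst this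
          have : (['*','*'] : List Char).isPrefixOf ('*' :: '*' :: t') = true :=
            (pv_prefixSS _).mpr ⟨t', rfl⟩
          rw [this] at hpre; simp at hpre
    rw [hpre2]; simp

theorem pv_decomp (s : List Char) (h : pvHasDS s = true) :
    ∃ p r, s = p ++ '*' :: '*' :: r ∧ pvHasDS (p ++ ['*']) = false := by
  induction s with
  | nil => simp [pvHasDS] at h
  | cons c t ih =>
    rw [pv_hasDS_cons] at h
    by_cases hp : (['*','*'] : List Char).isPrefixOf (c :: t) = true
    · obtain ⟨t', ht⟩ := (pv_prefixSS _).mp hp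
      injection ht with e1 e2; subst e1; subst e2
      exact ⟨[], t', rfl, by decide⟩
    · have ht : pvHasDS t = true := by
        cases h2 : pvHasDS t <;> simp_all
      obtain ⟨p, r, rfl, hcond⟩ := ih ht
      refine ⟨c :: p, r, rfl, ?_⟩
      rw [List.cons_append, pv_hasDS_cons, hcond]
      have : (['*','*'] : List Char).isPrefixOf (c :: (p ++ ['*'])) = false := by
        cases hP : (['*','*'] : List Char).isPrefixOf (c :: (p ++ ['*']))
        · rfl
        · exfalso
          obtain ⟨t2, ht2⟩ := (pv_prefixSS _).mp hP
          injection ht2 with e1 e2; subst e1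
          have hh : (p ++ ['*']).head? = some '*' := by rw [e2]; rfl
          match p, hh with
          | [], _ =>
            exact hp ((pv_prefixSS _).mpr ⟨'*' :: r, by simp⟩)
          | d :: p', hh =>
            have : d = '*' := by simpa using hh
            subst this
            exact hp ((pv_prefixSS _).mpr ⟨p' ++ '*' :: '*' :: r, rfl⟩)
      rw [this]; simp

-- extraction from the canonical decomposition condition
theorem pv_no_p (p : List Char) (h : pvHasDS (p ++ ['*']) = false) : pvHasDS p = false := by
  cases hp : pvHasDS p
  · rfl
  · rw [pv_hasDS_append_left p ['*'] hp] at h; exact absurd h (by simp)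

theorem pv_last_p (p : List Char) (h : pvHasDS (p ++ ['*']) = false) :
    p.getLast? ≠ some '*' := by
  intro hl
  have := pv_hasDS_ends_star p [] hl
  rw [this] at h; exact absurd h (by simp)

-- ===== replace-first lemmas =====
theorem pv_rep_ss (r t : List Char) : pvReplace1 ('*' :: '*' :: r) ['*','*'] t = t ++ r := by
  have hp : (['*','*'] : List Char).isPrefixOf ('*' :: '*' :: r) = true :=
    (pv_prefixSS _).mpr ⟨r, rfl⟩
  simp [pvReplace1, hp]

theorem pv_rep_no (y t : List Char) (h : pvHasDS y = false) :
    pvReplace1 y ['*','*'] t = y := by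
  induction y with
  | nil => rfl
  | cons c cs ih =>
    rw [pv_hasDS_cons] at h
    have hp : (['*','*'] : List Char).isPrefixOf (c :: cs) = false := by
      cases h2 : (['*','*'] : List Char).isPrefixOf (c :: cs) <;> simp_all
    have hcs : pvHasDS cs = false := by
      cases h2 : pvHasDS cs <;> simp_all
    simp [pvReplace1, hp, ih hcs]

theorem pv_rep_app (x y t : List Char) (h : pvHasDS (x ++ y.take 1) = false) :
    pvReplace1 (x ++ y) ['*','*'] t = x ++ pvReplace1 y ['*','*'] t := by
  induction x with
  | nil => rfl
  | cons c x' ih =>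
    rw [List.cons_append, pv_hasDS_cons] at h
    have hpre : (['*','*'] : List Char).isPrefixOf (c :: (x' ++ y.take 1)) = false := by
      cases h2 : (['*','*'] : List Char).isPrefixOf (c :: (x' ++ y.take 1)) <;> simp_all
    have htail : pvHasDS (x' ++ y.take 1) = false := by
      cases h2 : pvHasDS (x' ++ y.take 1) <;> simp_all
    have hpre2 : (['*','*'] : List Char).isPrefixOf (c :: (x' ++ y)) = false := by
      cases hP : (['*','*'] : List Char).isPrefixOf (c :: (x' ++ y))
      · rfl
      · exfalso
        obtain ⟨t2, ht2⟩ := (pv_prefixSS _).mp hP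
        injection ht2 with e1 e2; subst e1
        match x', e2 with
        | [], e2 =>
          -- y starts with '*', so [c] ++ y.take 1 = ['*','*']
          have hy : y.head? = some '*' := by
            rw [show ([] : List Char) ++ y = y from rfl] at e2
            rw [e2]; rfl
          match y, hy with
          | yc :: ys, hy =>
            have : yc = '*' := by simpa using hy
            subst this
            exact absurd ((pv_prefixSS _).mpr ⟨[], rfl⟩) (by simp_all)
        | d :: x'', e2 =>
          have : d = '*' := by have := congrArg List.head? e2; simpa using this
          subst this
          exact absurd ((pv_prefixSS _).mpr ⟨x'' ++ y.take 1, rfl⟩) (by simp_all)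
    rw [List.cons_append, pvReplace1, hpre2]
    simp only [Bool.false_eq_true, if_false]
    rw [ih htail, List.cons_append]

-- ===== scan lemmas =====
theorem pv_scan_ss (t : List Char) (b : Bool) :
    pvScanB ('*' :: '*' :: t) b = (if b then pvClose else pvOpen) ++ pvScanB t (!b) := by
  simp [pvScanB]

theorem pv_scan_cons (a c : Char) (t : List Char) (b : Bool)
    (h : ¬ (a = '*' ∧ c = '*')) :
    pvScanB (a :: c :: t) b = a :: pvScanB (c :: t) b := by
  have : (a == '*' && c == '*') = false := by
    cases h1 : a == '*' <;> cases h2 : c == '*' <;> simp_all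
  simp [pvScanB, this]

theorem pv_scan_no (y : List Char) (h : pvHasDS y = false) (b : Bool) :
    pvScanB y b = y := by
  induction y with
  | nil => rfl
  | cons c t ih =>
    match t with
    | [] => rfl
    | d :: t' =>
      rw [pv_hasDS_cons] at h
      have hpre : (['*','*'] : List Char).isPrefixOf (c :: d :: t') = false := by
        cases h2 : (['*','*'] : List Char).isPrefixOf (c :: d :: t') <;> simp_all
      have ht : pvHasDS (d :: t') = false := by
        cases h2 : pvHasDS (d :: t') <;> simp_all
      have hne : ¬ (c = '*' ∧ d = '*') := by
        rintro ⟨rfl, rfl⟩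
        exact absurd ((pv_prefixSS _).mpr ⟨t', rfl⟩) (by simp_all)
      rw [pv_scan_cons c d t' b hne, ih ht]

theorem pv_scan_app (x y : List Char) (h : pvHasDS (x ++ y.take 1) = false) (b : Bool) :
    pvScanB (x ++ y) b = x ++ pvScanB y b := by
  induction x with
  | nil => rfl
  | cons c x' ih =>
    rw [List.cons_append, pv_hasDS_cons] at h
    have hpre : (['*','*'] : List Char).isPrefixOf (c :: (x' ++ y.take 1)) = false := by
      cases h2 : (['*','*'] : List Char).isPrefixOf (c :: (x' ++ y.take 1)) <;> simp_all
    have htail : pvHasDS (x' ++ y.take 1) = false := by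
      cases h2 : pvHasDS (x' ++ y.take 1) <;> simp_all
    match x' with
    | [] =>
      match y with
      | [] => rfl
      | d :: w =>
        have hne : ¬ (c = '*' ∧ d = '*') := by
          rintro ⟨rfl, rfl⟩
          exact absurd ((pv_prefixSS _).mpr ⟨[], rfl⟩) (by simp_all)
        simpa using pv_scan_cons c d w b hne
    | e :: x'' =>
      have hne : ¬ (c = '*' ∧ e = '*') := by
        rintro ⟨rfl, rfl⟩
        exact absurd ((pv_prefixSS _).mpr ⟨x'' ++ y.take 1, rfl⟩) (by simp_all)
      rw [List.cons_append, List.cons_append, pv_scan_cons c e (x'' ++ y) b hne]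
      rw [← List.cons_append, ih htail]
      simp

-- ===== static facts about the tag constants =====
theorem pv_open_no : pvHasDS pvOpen = false := by decide
theorem pv_close_no : pvHasDS pvClose = false := by decide
theorem pv_open_last : pvOpen.getLast? ≠ some '*' := by decide
theorem pv_close_last : pvClose.getLast? ≠ some '*' := by decide
theorem pv_open_count : pvOpen.count '*' = 0 := by decide
theorem pv_close_count : pvClose.count '*' = 0 := by decide

-- isIn ['*','*'] computed by pvHasDS
theorem pv_findgo_ss (l : List Char) : ∀ k : Nat,
    (PySem.Chars.find.go ['*','*'] l k = -1) ↔ pvHasDS l = false := by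
  induction l with
  | nil =>
    intro k
    rw [PySem.Chars.find.go]
    simp [pvHasDS]
  | cons c t ih =>
    intro k
    rw [PySem.Chars.find.go]
    by_cases hp : (['*','*'] : List Char).isPrefixOf (c :: t) = true
    · simp only [hp, if_true]
      constructor
      · intro hk; omega
      · intro hds
        rw [pv_hasDS_cons, hp] at hds; simp at hds
    · have hp' : (['*','*'] : List Char).isPrefixOf (c :: t) = false := by
        cases h2 : (['*','*'] : List Char).isPrefixOf (c :: t) <;> simp_all
      simp only [hp', Bool.false_eq_true, if_false]
      rw [ih (k+1), pv_hasDS_cons, hp']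
      simp

theorem pv_isIn_ss (s : List Char) : PySem.Chars.isIn ['*','*'] s = pvHasDS s := by
  unfold PySem.Chars.isIn PySem.Chars.find
  have := pv_findgo_ss s 0
  cases h : pvHasDS s
  · rw [h] at this
    have h2 : PySem.Chars.find.go ['*','*'] s 0 = -1 := this.mpr rfl
    simp [h2]
  · rw [h] at this
    have h2 : PySem.Chars.find.go ['*','*'] s 0 ≠ -1 := by
      intro hc; have := this.mp hc; simp at this
    simp [bne, h2]

-- star counting
theorem pv_rep_count_le (r t : List Char) (h : t.count '*' = 0) :
    (pvReplace1 r ['*','*'] t).count '*' ≤ r.count '*' := by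
  induction r with
  | nil => simp [pvReplace1]
  | cons c cs ih =>
    by_cases hp : (['*','*'] : List Char).isPrefixOf (c :: cs) = true
    · obtain ⟨t', ht⟩ := (pv_prefixSS _).mp hp
      injection ht with e1 e2; subst e1; subst e2
      rw [pv_rep_ss]
      simp [List.count_append, h]
      omega
    · have hp' : (['*','*'] : List Char).isPrefixOf (c :: cs) = false := by
        cases h2 : (['*','*'] : List Char).isPrefixOf (c :: cs) <;> simp_all
      simp only [pvReplace1, hp', Bool.false_eq_true, if_false]
      simp only [List.count_cons]
      omega

-- key step lemma: scanning the close-replaced rest with parity false equals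
-- scanning the rest with parity true
theorem pv_scan_rep_close (r : List Char) :
    pvScanB (pvReplace1 r ['*','*'] pvClose) false = pvScanB r true := by
  cases h : pvHasDS r
  · rw [pv_rep_no r pvClose h, pv_scan_no r h, pv_scan_no r h]
  · obtain ⟨q, u, rfl, hq⟩ := pv_decomp _ h
    have hqno := pv_no_p q hq
    have hqlast := pv_last_p q hq
    have e1 : pvReplace1 (q ++ '*' :: '*' :: u) ['*','*'] pvClose
        = q ++ (pvClose ++ u) := by
      rw [pv_rep_app q ('*' :: '*' :: u) pvClose (by simpa using hq), pv_rep_ss]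
    rw [e1]
    have hqc : pvHasDS (q ++ pvClose) = false :=
      pv_hasDS_append_false q pvClose hqno pv_close_no (Or.inl hqlast)
    have hqcu : pvHasDS ((q ++ pvClose) ++ u.take 1) = false := by
      apply pv_hasDS_append_false _ _ hqc (pv_hasDS_short _ (by simp only [List.length_take]; omega))
      left
      rw [List.getLast?_append_of_ne_nil _ (by decide)]
      exact pv_close_last
    have lhs : pvScanB (q ++ (pvClose ++ u)) false = (q ++ pvClose) ++ pvScanB u false := by
      rw [← List.append_assoc, pv_scan_app (q ++ pvClose) u hqcu]
    rw [lhs]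
    have rhs : pvScanB (q ++ '*' :: '*' :: u) true = q ++ (pvClose ++ pvScanB u false) := by
      rw [pv_scan_app q ('*' :: '*' :: u) (by simpa using hq), pv_scan_ss]
      simp
    rw [rhs, List.append_assoc]

-- hasDS needs at least two stars
theorem pv_hasDS_count (s : List Char) (h : pvHasDS s = true) : 2 ≤ s.count '*' := by
  obtain ⟨p, r, rfl, _⟩ := pv_decomp s h
  simp [List.count_append]
  omega

-- MAIN bold lemma: A's while loop = B's one-pass scan
theorem pv_bold_eq_scan : ∀ (fuel : Nat) (s : List Char), s.count '*' ≤ fuel →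
    pvBoldA fuel s = pvScanB s false := by
  intro fuel
  induction fuel with
  | zero =>
    intro s hs
    have h0 : pvHasDS s = false := by
      cases h : pvHasDS s
      · rfl
      · have := pv_hasDS_count s h; omega
    rw [pvBoldA, pv_scan_no s h0]
  | succ fuel ih =>
    intro s hs
    rw [pvBoldA, pv_isIn_ss]
    cases h : pvHasDS s
    · simp only [Bool.false_eq_true, if_false]
      rw [pv_scan_no s h]
    · simp only [if_true]
      obtain ⟨p, r, rfl, hp⟩ := pv_decomp _ h
      have hpno := pv_no_p p hp
      have hplast := pv_last_p p hp
      have e1 : pvReplace1 (p ++ '*' :: '*' :: r) ['*','*'] pvOpen = p ++ (pvOpen ++ r) := by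
        rw [pv_rep_app p ('*' :: '*' :: r) pvOpen (by simpa using hp), pv_rep_ss]
      have hpo : pvHasDS (p ++ pvOpen) = false :=
        pv_hasDS_append_false p pvOpen hpno pv_open_no (Or.inl hplast)
      have hpor : pvHasDS ((p ++ pvOpen) ++ r.take 1) = false := by
        apply pv_hasDS_append_false _ _ hpo (pv_hasDS_short _ (by simp only [List.length_take]; omega))
        left
        rw [List.getLast?_append_of_ne_nil _ (by decide)]
        exact pv_open_last
      have e2 : pvReplace1 (p ++ (pvOpen ++ r)) ['*','*'] pvClose
          = (p ++ pvOpen) ++ pvReplace1 r ['*','*'] pvClose := by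
        rw [← List.append_assoc, pv_rep_app (p ++ pvOpen) r pvClose hpor]
      rw [e1, e2]
      have hcnt : ((p ++ pvOpen) ++ pvReplace1 r ['*','*'] pvClose).count '*' ≤ fuel := by
        have h1 := pv_rep_count_le r pvClose pv_close_count
        have h2 : (p ++ '*' :: '*' :: r).count '*'
            = p.count '*' + 2 + r.count '*' := by
          simp [List.count_append]; omega
        simp [List.count_append, pv_open_count]
        omega
      rw [ih _ hcnt]
      -- both sides now scan; move the common prefix out
      have lhs : pvScanB ((p ++ pvOpen) ++ pvReplace1 r ['*','*'] pvClose) false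
          = (p ++ pvOpen) ++ pvScanB (pvReplace1 r ['*','*'] pvClose) false := by
        apply pv_scan_app
        apply pv_hasDS_append_false _ _ hpo
        · apply pv_hasDS_short; simp only [List.length_take]; omega
        · left
          rw [List.getLast?_append_of_ne_nil _ (by decide)]
          exact pv_open_last
      have rhs : pvScanB (p ++ '*' :: '*' :: r) false = p ++ (pvOpen ++ pvScanB r true) := by
        rw [pv_scan_app p ('*' :: '*' :: r) (by simpa using hp), pv_scan_ss]
        simp
      rw [lhs, rhs, pv_scan_rep_close, List.append_assoc]

-- ===== colon lemmas (find / splitOn / splitOnMax with sep [':']) =====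
theorem pv_prefix_colon (c : Char) (t : List Char) :
    ([':'] : List Char).isPrefixOf (c :: t) = (c == ':') := by
  simp [List.isPrefixOf]
  exact eq_comm

theorem pv_findgo_colon (l : List Char) : ∀ k : Nat,
    PySem.Chars.find.go [':'] l k =
      if ':' ∈ l then ((k : Int) + (l.takeWhile (· ≠ ':')).length) else -1 := by
  induction l with
  | nil => intro k; rw [PySem.Chars.find.go]; simp
  | cons c t ih =>
    intro k
    rw [PySem.Chars.find.go, pv_prefix_colon]
    by_cases hc : c = ':'
    · subst hc; simp [List.takeWhile]
    · have : (c == ':') = false := by simp [hc]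
      simp only [this, Bool.false_eq_true, if_false]
      rw [ih (k+1)]
      by_cases hm : ':' ∈ t
      · simp [hm, hc, List.takeWhile, List.mem_cons]
        omega
      · simp [hm, hc, List.mem_cons]
        intro h; exact absurd h.symm hc

theorem pv_find_colon (l : List Char) :
    PySem.Chars.find l [':'] =
      if ':' ∈ l then ((l.takeWhile (· ≠ ':')).length : Int) else -1 := by
  unfold PySem.Chars.find
  rw [pv_findgo_colon l 0]
  simp

theorem pv_isIn_colon (l : List Char) :
    PySem.Chars.isIn [':'] l = decide (':' ∈ l) := by
  unfold PySem.Chars.isIn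
  rw [pv_find_colon]
  by_cases hm : ':' ∈ l
  · simp [hm, bne]
  · simp [hm, bne]

theorem pv_splitOn_go_head (l : List Char) : ∀ (fuel : Nat) (cur : List Char)
    (acc : List (List Char)), l.length < fuel →
    ∃ rest, PySem.Chars.splitOn.go [':'] fuel l cur acc
      = acc.reverse ++ (cur.reverse ++ l.takeWhile (· ≠ ':')) :: rest := by
  induction l with
  | nil =>
    intro fuel cur acc hf
    match fuel with
    | f+1 =>
      rw [PySem.Chars.splitOn.go]
      refine ⟨[], ?_⟩
      simp
      omega
  | cons c t ih =>
    intro fuel cur acc hf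
    match fuel with
    | f+1 =>
      rw [PySem.Chars.splitOn.go, pv_prefix_colon]
      by_cases hc : c = ':'
      · subst hc
        simp only [beq_self_eq_true, if_true]
        obtain ⟨rest, hrest⟩ := ih f [] (cur.reverse :: acc) (by simp at hf; omega)
        refine ⟨t.takeWhile (· ≠ ':') :: rest, ?_⟩
        rw [show List.drop ([':'] : List Char).length (':' :: t) = t from rfl, hrest]
        simp [List.takeWhile]
      · have hcb : (c == ':') = false := by simp [hc]
        simp only [hcb, Bool.false_eq_true, if_false]
        obtain ⟨rest, hrest⟩ := ih f (c :: cur) acc (by simp at hf; omega)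
        refine ⟨rest, ?_⟩
        rw [hrest]
        simp [List.takeWhile, hc]

theorem pv_splitOn_head (l : List Char) :
    (PySem.Chars.splitOn l [':']).getD 0 [] = l.takeWhile (· ≠ ':') := by
  unfold PySem.Chars.splitOn
  obtain ⟨rest, hrest⟩ := pv_splitOn_go_head l (l.length + 1) [] [] (by omega)
  rw [hrest]; simp

theorem pv_splitOnMax_go_zero : ∀ (fuel : Nat) (l cur : List Char)
    (acc : List (List Char)),
    PySem.Chars.splitOnMax.go [':'] fuel 0 l cur acc
      = acc.reverse ++ [cur.reverse ++ l] := by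
  intro fuel l cur acc
  match fuel, l with
  | 0, l => rw [PySem.Chars.splitOnMax.go]; simp
  | f+1, [] => rw [PySem.Chars.splitOnMax.go]; simp; omega
  | f+1, c :: t => rw [PySem.Chars.splitOnMax.go]; simp

theorem pv_splitOnMax_go_one (l : List Char) : ∀ (fuel : Nat) (cur : List Char)
    (acc : List (List Char)), l.length < fuel →
    PySem.Chars.splitOnMax.go [':'] fuel 1 l cur acc
      = acc.reverse ++ (cur.reverse ++ l.takeWhile (· ≠ ':'))
          :: (if ':' ∈ l then [(l.dropWhile (· ≠ ':')).drop 1] else []) := by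
  induction l with
  | nil =>
    intro fuel cur acc hf
    match fuel with
    | f+1 => rw [PySem.Chars.splitOnMax.go]; simp; omega
  | cons c t ih =>
    intro fuel cur acc hf
    match fuel with
    | f+1 =>
      rw [PySem.Chars.splitOnMax.go]
      simp only [show (1 : Nat) ≠ 0 by decide, if_false]
      rw [pv_prefix_colon]
      by_cases hc : c = ':'
      · subst hc
        simp only [beq_self_eq_true, if_true]
        rw [show (1 : Nat) - 1 = 0 from rfl, pv_splitOnMax_go_zero]
        simp [List.takeWhile, List.dropWhile]
      · have hcb : (c == ':') = false := by simp [hc]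
        simp only [hcb, Bool.false_eq_true, if_false]
        rw [ih f (c :: cur) acc (by simp at hf; omega)]
        by_cases hm : ':' ∈ t
        · simp [List.takeWhile, List.dropWhile, hc, hm, List.mem_cons]
        · have : ':' ∈ c :: t ↔ False := by
            simp [List.mem_cons, hm]; intro h; exact absurd h.symm hc
          simp [List.takeWhile, hc, hm, this]

theorem pv_splitOnMax_one (l : List Char) :
    PySem.Chars.splitOnMax l [':'] 1
      = (l.takeWhile (· ≠ ':'))
          :: (if ':' ∈ l then [(l.dropWhile (· ≠ ':')).drop 1] else []) := by
  unfold PySem.Chars.splitOnMax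
  rw [if_neg (by omega), show Int.toNat 1 = 1 from rfl]
  rw [pv_splitOnMax_go_one l (l.length + 1) [] [] (by omega)]
  simp

theorem pv_take_tw (l : List Char) :
    l.take (l.takeWhile (· ≠ ':')).length = l.takeWhile (· ≠ ':') := by
  rw [show l.take (l.takeWhile (· ≠ ':')).length
      = (l.takeWhile (· ≠ ':') ++ l.dropWhile (· ≠ ':')).take (l.takeWhile (· ≠ ':')).length
      from by rw [List.takeWhile_append_dropWhile]]
  exact List.take_left

theorem pv_drop_app (t d : List Char) : (t ++ d).drop (t.length + 1) = d.drop 1 := by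
  induction t with
  | nil => simp
  | cons a t ih => simp [ih]

theorem pv_drop_tw (l : List Char) :
    l.drop ((l.takeWhile (· ≠ ':')).length + 1) = (l.dropWhile (· ≠ ':')).drop 1 := by
  rw [show l.drop ((l.takeWhile (· ≠ ':')).length + 1)
      = (l.takeWhile (· ≠ ':') ++ l.dropWhile (· ≠ ':')).drop ((l.takeWhile (· ≠ ':')).length + 1)
      from by rw [List.takeWhile_append_dropWhile]]
  exact pv_drop_app _ _

-- per-line equivalence
theorem pv_line_eq (l : List Char) : pvLineA l = pvLineB l := by
  simp only [pvLineA, pvLineB]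
  rw [pv_bold_eq_scan l.length l List.count_le_length]
  set l1 := pvScanB l false with hl1
  rw [pv_isIn_colon, pv_find_colon, pv_splitOn_head, pv_splitOnMax_one]
  by_cases hm : ':' ∈ l1
  · simp only [hm, decide_true, if_true, Bool.true_and]
    have hne : (((l1.takeWhile (· ≠ ':')).length : Int) == -1) = false := by
      simp
    rw [hne]
    simp only [Bool.false_eq_true, if_false]
    have htn : ((l1.takeWhile (· ≠ ':')).length : Int).toNat
        = (l1.takeWhile (· ≠ ':')).length := by omega
    rw [htn, pv_take_tw, pv_drop_tw]
    simp
  · simp [hm]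

-- whole-function equivalence
theorem pv_main (response : String) :
    format_chatgpt_response response = format_chatgpt_response_alt response := by
  unfold format_chatgpt_response format_chatgpt_response_alt
  dsimp only
  rw [PySem.List.foldl_append_if
    (p := fun l => !(PySem.Chars.strip l).isEmpty)
    (f := fun l => pvLineA l ++ pvBr)]
  have hfun : (fun l => pvLineA l ++ pvBr) = (fun l => pvLineB l ++ pvBr) := by
    funext l; rw [pv_line_eq]
  rw [hfun]
  rfl

-- ===== VERDICT (by name: the statement is the Claim_ definition above) =====
theorem format_chatgpt_response_spec : Claim_equal_format_chatgpt_response := by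
  intro response _
  exact pv_main response
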